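-- pv_equiv track=rewrite | github.com/KudusBannah/A2SV | Cirno's perfect bitmask classroom.py | solve
-- ===== SOURCE A (Python) =====
-- def solve(x):
--     count = 0
--     for i in range(x.bit_length()):
--         if x & (1<<i) != 0:
--             count += 1
--
--     # find the first 1
--     i = 0
--     while i < x.bit_length():
--         if x & (1<<i) != 0:
--             break
--         i += 1
--
--     if count > 1:
--         return 1 << i
--     else:
--         # find the first 0
--         j = 0
--         while j < x.bit_length():
--             if x & (1<<j) == 0:
--                 break
--             j += 1
--     return (1 << i) ^ (1 << j)
-- ===== SOURCE B (Python) =====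
-- def solve(x):
--     # One pass over the bits: count set bits and record the first set and
--     # first clear positions, instead of A's three separate scans.
--     bl = x.bit_length()
--     count = 0
--     first_one = 0
--     first_zero = bl
--     seen_one = False
--     seen_zero = False
--     for i in range(bl):
--         if x & (1 << i):
--             count += 1
--             if not seen_one:
--                 first_one = i
--                 seen_one = True
--         elif not seen_zero:
--             first_zero = i
--             seen_zero = True
--     if count > 1:
--         return 1 << first_one
--     return (1 << first_one) ^ (1 << first_zero)
-- ===== Notes on version B (the rewrite author's own statement) =====
-- stated objective: alternative
-- what changed: Replaces A's three separate bit scans (a counting loop plus two while-loop searches) with a single pass over range(x.bit_length()) that accumulates the popcount and records the first set and first clear bit positions in one accumulator state.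
import Mathlib
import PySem

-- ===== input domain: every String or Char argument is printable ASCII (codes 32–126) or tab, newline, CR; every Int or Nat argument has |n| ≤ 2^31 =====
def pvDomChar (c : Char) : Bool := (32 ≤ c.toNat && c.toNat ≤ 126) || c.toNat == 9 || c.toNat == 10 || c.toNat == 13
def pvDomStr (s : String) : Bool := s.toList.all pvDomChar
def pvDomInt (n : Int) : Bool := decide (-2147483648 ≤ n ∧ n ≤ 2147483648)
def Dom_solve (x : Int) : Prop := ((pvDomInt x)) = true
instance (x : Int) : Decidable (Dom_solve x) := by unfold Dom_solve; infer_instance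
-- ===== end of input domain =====

-- B replaces A's three separate bit scans with a single pass over the bit range that
-- accumulates the popcount and the first set / first clear positions (alternative decomposition, same cost).


-- ===== PORT A =====
-- the test `x & (1 << i) != 0` both Pythons perform, as a helper (Python's 1 << i is exact here)
def pbit (x : Int) (i : Nat) : Int := PySem.Int.band x ((1 <<< i : Nat) : Int)

-- while-loop "find the first 1": i advances until i = bl or bit i of x is set
def solveFindOne (x : Int) (bl i : Nat) : Nat :=
  if i < bl then
    (if pbit x i ≠ 0 then i else solveFindOne x bl (i + 1))
  else i
termination_by bl - i

-- while-loop "find the first 0": j advances until j = bl or bit j of x is clear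
def solveFindZero (x : Int) (bl j : Nat) : Nat :=
  if j < bl then
    (if pbit x j = 0 then j else solveFindZero x bl (j + 1))
  else j
termination_by bl - j

def solve (x : Int) : Int :=
  let bl := PySem.Int.bitLength x
  let count := (List.range bl).foldl (fun c i => if pbit x i ≠ 0 then c + 1 else c) (0 : Nat)
  let i := solveFindOne x bl 0
  if count > 1 then ((1 <<< i : Nat) : Int)
  else
    let j := solveFindZero x bl 0
    PySem.Int.bxor ((1 <<< i : Nat) : Int) ((1 <<< j : Nat) : Int)

-- ===== PORT B =====
structure BState where
  count : Nat
  fo : Nat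
  fz : Nat
  so : Bool
  sz : Bool
deriving Repr, DecidableEq

def stepB (x : Int) (s : BState) (i : Nat) : BState :=
  if pbit x i ≠ 0 then
    { s with count := s.count + 1, fo := if s.so then s.fo else i, so := true }
  else
    { s with fz := if s.sz then s.fz else i, sz := true }

def solve_alt (x : Int) : Int :=
  let bl := PySem.Int.bitLength x
  let s := (List.range bl).foldl (stepB x) ⟨0, 0, bl, false, false⟩
  if s.count > 1 then ((1 <<< s.fo : Nat) : Int)
  else PySem.Int.bxor ((1 <<< s.fo : Nat) : Int) ((1 <<< s.fz : Nat) : Int)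

-- ===== PRECONDITION & SPEC =====
def Spec_solve (x : Int) (out : Int) : Prop := out = solve_alt x
instance (x : Int) (out : Int) : Decidable (Spec_solve x out) := by unfold Spec_solve; infer_instance

-- ===== CLAIM (what is proved, stated in full; the proofs are below) =====
def Claim_equal_solve : Prop := ∀ (x : Int), Dom_solve x → Spec_solve x (solve x)

-- ===== LEMMAS AND PROOFS =====

-- the bit test as a Bool predicate, for find?/countP/any
def pb (x : Int) (i : Nat) : Bool := decide (pbit x i ≠ 0)

theorem foldB_char (x : Int) (l : List Nat) (s : BState) :
    l.foldl (stepB x) s =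
      ⟨ s.count + l.countP (pb x),
        if s.so then s.fo else (l.find? (pb x)).getD s.fo,
        if s.sz then s.fz else (l.find? (fun i => !(pb x i))).getD s.fz,
        s.so || l.any (pb x),
        s.sz || l.any (fun i => !(pb x i)) ⟩ := by
  induction l generalizing s with
  | nil => cases s; simp [List.countP, List.countP.go]
  | cons a l ih =>
    by_cases h : pbit x a ≠ 0
    · rw [List.foldl_cons, stepB, if_pos h, ih]
      cases s with
      | mk c fo fz so sz =>
        simp only [pb, List.countP_cons, List.find?, List.any_cons, h, not_false_iff,
          decide_true, Bool.not_true, cond_true, cond_false, Bool.true_or, Bool.or_true]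
        cases so <;> simp [h, Nat.add_comm, Nat.add_left_comm]
    · rw [List.foldl_cons, stepB, if_neg h, ih]
      cases s with
      | mk c fo fz so sz =>
        simp only [pb, List.countP_cons, List.find?, List.any_cons, h,
          decide_false, Bool.not_false, cond_true, cond_false]
        cases sz <;> simp [h]

theorem findOne_char (x : Int) (bl : Nat) :
    ∀ (k i : Nat), i + k = bl →
      solveFindOne x bl i = ((List.range' i k).find? (pb x)).getD bl := by
  intro k
  induction k with
  | zero => intro i h; unfold solveFindOne; simp [h.symm]
  | succ k ih =>
    intro i h
    unfold solveFindOne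
    rw [if_pos (by omega : i < bl), List.range'_succ]
    by_cases hb : pbit x i ≠ 0
    · rw [if_pos hb, List.find?_cons_of_pos (p := pb x) (by simp [pb, hb])]; simp
    · rw [if_neg hb, List.find?_cons_of_neg (p := pb x) (by simp [pb, hb])]
      exact ih (i + 1) (by omega)

theorem findZero_char (x : Int) (bl : Nat) :
    ∀ (k j : Nat), j + k = bl →
      solveFindZero x bl j = ((List.range' j k).find? (fun i => !(pb x i))).getD bl := by
  intro k
  induction k with
  | zero => intro j h; unfold solveFindZero; simp [h.symm]
  | succ k ih =>
    intro j h
    unfold solveFindZero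
    rw [if_pos (by omega : j < bl), List.range'_succ]
    by_cases hb : pbit x j = 0
    · rw [if_pos hb, List.find?_cons_of_pos (p := fun i => !(pb x i)) (by simp [pb, hb])]
      simp
    · rw [if_neg hb, List.find?_cons_of_neg (p := fun i => !(pb x i)) (by simp [pb, hb])]
      exact ih (j + 1) (by omega)

theorem count_char (x : Int) (l : List Nat) :
    ∀ c : Nat, l.foldl (fun c i => if pbit x i ≠ 0 then c + 1 else c) c = c + l.countP (pb x) := by
  induction l with
  | nil => intro c; simp [List.countP, List.countP.go]
  | cons a l ih =>
    intro c
    rw [List.foldl_cons]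
    by_cases h : pbit x a ≠ 0
    · rw [if_pos h, ih, List.countP_cons_of_pos (p := pb x) (by simp [pb, h])]; omega
    · rw [if_neg h, ih, List.countP_cons_of_neg (p := pb x) (by simp [pb, h])]

theorem all_ones_ge (p L : Nat) (h : ∀ i < L, p.testBit i = true) : 2 ^ L - 1 ≤ p := by
  have hm : p % 2 ^ L = 2 ^ L - 1 := by
    apply Nat.eq_of_testBit_eq
    intro i
    rw [Nat.testBit_mod_two_pow, Nat.testBit_two_pow_sub_one]
    by_cases hi : i < L <;> simp [hi, h]
  have := Nat.mod_le p (2 ^ L)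
  omega

theorem top_testBit (m L : Nat) (h1 : 2 ^ (L - 1) ≤ m) (h2 : m < 2 ^ L) (hL : 0 < L) :
    m.testBit (L - 1) = true := by
  have h3 : 2 ^ L = 2 ^ (L - 1) * 2 := by rw [← pow_succ]; congr 1; omega
  have : m / 2 ^ (L - 1) = 1 := Nat.div_eq_of_lt_le (by omega) (by omega)
  simp [Nat.testBit_eq_decide_div_mod_eq, this]

theorem toNat_one_shl (i : Nat) : (((1 <<< i : Nat) : Int)).toNat = 2 ^ i := by
  rw [Nat.shiftLeft_eq, Int.toNat_natCast, Nat.one_mul]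

-- some bit of x below bit_length(x) is set, for x ≠ 0 (both signs)
theorem exists_set_bit (x : Int) (hx : x ≠ 0) :
    ∃ i < PySem.Int.bitLength x, pb x i = true := by
  set L := PySem.Int.bitLength x with hL
  have hlt : x.natAbs < 2 ^ L := PySem.Int.lt_two_pow_bitLength x
  have hge : 2 ^ (L - 1) ≤ x.natAbs := PySem.Int.two_pow_bitLength_le x hx
  have hLpos : 0 < L := by
    by_contra h
    have h0 : L = 0 := by omega
    rw [h0] at hlt
    simp at hlt
    exact hx (by omega)
  by_cases hpos : 0 ≤ x
  · -- positive: the top bit (L-1) is set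
    refine ⟨L - 1, by omega, ?_⟩
    have htb : x.natAbs.testBit (L - 1) = true := top_testBit _ _ hge hlt hLpos
    simp only [pb, pbit, decide_eq_true_eq]
    rw [PySem.Int.band_of_nonneg hpos (by positivity), show x.toNat = x.natAbs by omega,
      toNat_one_shl, Nat.and_two_pow, htb]
    simp
  · -- negative: some bit of (natAbs x - 1) below L is clear, and that bit of x is set
    push_neg at hpos
    set m := x.natAbs with hm
    have hclear : ∃ i < L, (m - 1).testBit i = false := by
      by_contra h
      push_neg at h
      have hall : ∀ i < L, (m - 1).testBit i = true := by
        intro i hi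
        cases hb : (m - 1).testBit i
        · exact absurd hb (by simpa using h i hi)
        · rfl
      have := all_ones_ge (m - 1) L hall
      have hm1 : 1 ≤ m := by omega
      omega
    obtain ⟨i, hi, hbit⟩ := hclear
    refine ⟨i, hi, ?_⟩
    simp only [pb, pbit, decide_eq_true_eq]
    unfold PySem.Int.band
    rw [if_neg (by omega), if_pos (by positivity : (0:Int) ≤ ((1 <<< i : Nat) : Int))]
    rw [toNat_one_shl, show (-x - 1).toNat = m - 1 by omega, Nat.two_pow_and, hbit]
    simp

theorem range'_zero_eq_range (n : Nat) : List.range' 0 n = List.range n :=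
  (List.range_eq_range').symm

-- ===== VERDICT (by name: the statement is the Claim_ definition above) =====
theorem solve_spec : Claim_equal_solve := by
  intro x _
  unfold Spec_solve solve solve_alt
  simp only [foldB_char, count_char,
    findOne_char x (PySem.Int.bitLength x) (PySem.Int.bitLength x) 0 (by omega),
    findZero_char x (PySem.Int.bitLength x) (PySem.Int.bitLength x) 0 (by omega),
    range'_zero_eq_range]
  set bl := PySem.Int.bitLength x with hbl
  cases hf : (List.range bl).find? (pb x) with
  | some j => simp
  | none =>
    have hx0 : x = 0 := by
      by_contra hx
      obtain ⟨i, hi, hb⟩ := exists_set_bit x hx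
      have := List.find?_eq_none.mp hf i (List.mem_range.mpr hi)
      simp [hb] at this
    have hbl0 : bl = 0 := by rw [hbl, hx0]; exact PySem.Int.bitLength_zero
    subst hx0
    simp [hbl0]
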